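-- pv_equiv track=rewrite | github.com/mirenk0/Algorithmic-Problems | 4-Hashing/samedist.py | find
-- ===== SOURCE A (Python) =====
-- def find(t):
--     dict = {}
--
--     for i, x in enumerate(t):
--         if x in dict:
--             dict[x].append(i)
--             continue
--
--         dict[x] = [i]
--
--     least_lst = []
--     for x in dict:
--         least_lst.append(max(dict[x]) - min(dict[x]))
--
--     return max(least_lst)
-- ===== SOURCE B (Python) =====
-- def find(t):
--     first = {}
--     best = 0
--     for i, x in enumerate(t):
--         if x in first:
--             best = max(best, i - first[x])
--         else:
--             first[x] = i
--     return best
-- ===== Notes on version B (the rewrite author's own statement) =====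
-- stated objective: simpler
-- what changed: Replaced A's two passes (group every index of each value into a dict of lists, then a second loop reducing each list with max-min and a final max) by a single online pass that keeps only each value's first index and a running best spread.
-- crash fix: On empty t, A raises ValueError (max() of an empty sequence); B returns 0. — e.g. on find([]): A raises ValueError, B returns 0
import Mathlib
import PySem

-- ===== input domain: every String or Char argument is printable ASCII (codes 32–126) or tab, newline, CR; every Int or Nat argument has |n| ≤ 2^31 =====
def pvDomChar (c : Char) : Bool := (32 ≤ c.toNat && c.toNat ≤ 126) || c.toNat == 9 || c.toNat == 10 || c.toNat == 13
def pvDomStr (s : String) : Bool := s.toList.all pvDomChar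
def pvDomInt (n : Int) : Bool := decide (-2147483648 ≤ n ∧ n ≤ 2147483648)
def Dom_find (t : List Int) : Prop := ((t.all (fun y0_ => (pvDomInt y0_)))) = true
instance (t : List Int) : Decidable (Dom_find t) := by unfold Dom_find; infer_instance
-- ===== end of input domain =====

-- B replaces A's two passes (group all indices per value, then reduce) by one online pass
-- keeping only each value's first index and a running best spread (objective: simpler).

-- ===== PORT A =====
def find (t : List Int) : Int :=
  let d : PySem.Dict Int (List Int) :=
    (PySem.List.enumerate t 0).foldl (fun d p =>
      if d.contains p.2 then d.modify p.2 [] (fun l => l ++ [p.1])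
      else d.insert p.2 [p.1]) PySem.Dict.empty
  let leastLst : List Int :=
    d.keys.foldl (fun acc x =>
      acc ++ [(PySem.List.max? (d.getD x []) (fun y => y)).getD 0
              - (PySem.List.min? (d.getD x []) (fun y => y)).getD 0]) []
  (PySem.List.max? leastLst (fun y => y)).getD 0

-- ===== PORT B =====
def find_alt (t : List Int) : Int :=
  ((PySem.List.enumerate t 0).foldl (fun st p =>
      if st.1.contains p.2 then (st.1, max st.2 (p.1 - st.1.getD p.2 0))
      else (st.1.insert p.2 p.1, st.2)) ((PySem.Dict.empty : PySem.Dict Int Int), (0 : Int))).2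

-- ===== PRECONDITION & SPEC =====
-- Pre_ excludes only the empty list, on which Python A raises ValueError (max() of empty sequence).
def Pre_find (t : List Int) : Prop := t ≠ []
instance (t : List Int) : Decidable (Pre_find t) := by unfold Pre_find; infer_instance
def pvWitness_find : List Int := [1, 2, 1]

-- On empty t, A raises ValueError (max() arg is an empty sequence); B returns 0.
def Raises_find (t : List Int) : Prop := t = []
instance (t : List Int) : Decidable (Raises_find t) := by unfold Raises_find; infer_instance
def pvRaiseWitness_find : List Int := []
def pvRaiseWitnessOut_find : Int := 0

def Spec_find (t : List Int) (out : Int) : Prop := out = find_alt t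
instance (t : List Int) (out : Int) : Decidable (Spec_find t out) := by unfold Spec_find; infer_instance

-- ===== CLAIM (what is proved, stated in full; the proofs are below) =====
def Claim_equal_find : Prop := ∀ (t : List Int), Dom_find t → Pre_find t → Spec_find t (find t)
def Claim_raises_find : Prop := (∀ (t : List Int), Dom_find t → Raises_find t → ¬ Pre_find t) ∧ (Dom_find (pvRaiseWitness_find) ∧ Raises_find (pvRaiseWitness_find) ∧ find_alt (pvRaiseWitness_find) = pvRaiseWitnessOut_find)

-- ===== LEMMAS AND PROOFS =====

-- occsFrom p n v = the list of (Int) indices of v in p, when p starts at index n; ascending.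
def occsFrom : List Int → Int → Int → List Int
  | [], _, _ => []
  | x :: r, n, v => if x = v then n :: occsFrom r (n + 1) v else occsFrom r (n + 1) v

-- the per-value spread A computes for key v over the whole list t
def gain (t : List Int) (v : Int) : Int :=
  (PySem.List.max? (occsFrom t 0 v) (fun y => y)).getD 0
  - (PySem.List.min? (occsFrom t 0 v) (fun y => y)).getD 0

theorem occsFrom_append (p : List Int) (q n v : Int) :
    occsFrom (p ++ [q]) n v
      = occsFrom p n v ++ (if q = v then [n + p.length] else []) := by
  induction p generalizing n with
  | nil => simp [occsFrom]
  | cons x r ih =>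
      simp only [List.cons_append, occsFrom, ih, List.length_cons]
      split_ifs <;> simp <;> ring_nf

theorem occsFrom_bound (p : List Int) (n v : Int) :
    ∀ e ∈ occsFrom p n v, n ≤ e ∧ e < n + p.length := by
  induction p generalizing n with
  | nil => simp [occsFrom]
  | cons x r ih =>
      intro e he
      simp only [occsFrom] at he
      split_ifs at he with hx
      · rw [List.mem_cons] at he
        rcases he with rfl | he
        · simp
        · have := ih (n + 1) e he; simp at this ⊢; omega
      · have := ih (n + 1) e he; simp at this ⊢; omega

theorem occsFrom_eq_nil_iff (p : List Int) (n v : Int) :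
    occsFrom p n v = [] ↔ v ∉ p := by
  induction p generalizing n with
  | nil => simp [occsFrom]
  | cons x r ih =>
      simp only [occsFrom, List.mem_cons]
      split_ifs with hx
      · subst hx; simp
      · rw [ih (n + 1)]; constructor
        · intro h hv; rcases hv with rfl | hv; exact hx rfl; exact h hv
        · intro h hv; exact h (Or.inr hv)

theorem foldl_min_of_le (l : List Int) (a : Int) (h : ∀ y ∈ l, a ≤ y) :
    l.foldl min a = a := by
  have h1 := (PySem.List.foldl_min_le l a).1
  rcases PySem.List.foldl_min_mem l a with h2 | h2
  · exact h2
  · exact le_antisymm h1 (h (l.foldl min a) h2)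

theorem foldl_max_of_le (l : List Int) (a c : Int) (ha : a ≤ c) (h : ∀ y ∈ l, y ≤ c) :
    l.foldl max a ≤ c := by
  rcases PySem.List.foldl_max_mem l a with h2 | h2
  · rw [h2]; exact ha
  · exact h (l.foldl max a) h2

theorem occsFrom_head_lt (p : List Int) (n v : Int) :
    ∀ c l', occsFrom p n v = c :: l' → ∀ y ∈ l', c < y := by
  induction p generalizing n with
  | nil => intro c l' h; simp [occsFrom] at h
  | cons x r ih =>
      intro c l' h
      simp only [occsFrom] at h
      split_ifs at h with hx
      · cases h
        intro y hy
        have := occsFrom_bound r (n + 1) v y hy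
        omega
      · exact ih (n + 1) c l' h

theorem min?_occsFrom (p : List Int) (n v : Int) :
    PySem.List.min? (occsFrom p n v) (fun y => y) = (occsFrom p n v).head? := by
  cases hocc : occsFrom p n v with
  | nil => simp [PySem.List.min?_eq_none_iff]
  | cons c l' =>
      rw [PySem.List.min?_id_cons]
      rw [foldl_min_of_le l' c (fun y hy => le_of_lt (occsFrom_head_lt p n v c l' hocc y hy))]
      rfl

theorem max?_append_singleton (l : List Int) (c : Int) (h : ∀ y ∈ l, y ≤ c) :
    PySem.List.max? (l ++ [c]) (fun y => y) = some c := by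
  cases l with
  | nil => rw [List.nil_append, PySem.List.max?_id_cons]; rfl
  | cons x r =>
      rw [List.cons_append, PySem.List.max?_id_cons, List.foldl_append]
      have hx : x ≤ c := h x (by simp)
      have hr : r.foldl max x ≤ c :=
        foldl_max_of_le r x c hx (fun y hy => h y (by simp [hy]))
      simp only [List.foldl_cons, List.foldl_nil]
      congr 1; omega

-- running max with shifted seed
theorem foldl_max_shift (l : List Int) (a b : Int) :
    l.foldl max (max a b) = max (l.foldl max a) b := by
  induction l generalizing a with
  | nil => simp
  | cons x r ih =>
      simp only [List.foldl_cons]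
      rw [show max (max a b) x = max (max a x) b by omega, ih]

theorem M_cons (y : Int) (l : List Int) :
    (y :: l).foldl max 0 = max y (l.foldl max 0) := by
  simp only [List.foldl_cons]
  rw [foldl_max_shift]
  exact max_comm _ _

theorem M_append (l : List Int) (c : Int) :
    (l ++ [c]).foldl max 0 = max (l.foldl max 0) c := by
  rw [List.foldl_append]
  rfl

theorem M_nonneg (l : List Int) : 0 ≤ l.foldl max 0 :=
  (PySem.List.le_foldl_max l 0).1

-- replacing the image of one member of S by a larger value
theorem M_map_update (S : List Int) (x c : Int) (g g' : Int → Int)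
    (hx : x ∈ S) (hagree : ∀ y ∈ S, y ≠ x → g' y = g y) (hgx : g' x = c) (hle : g x ≤ c) :
    (S.map g').foldl max 0 = max ((S.map g).foldl max 0) c := by
  induction S with
  | nil => simp at hx
  | cons y rest ih =>
      simp only [List.map_cons, M_cons]
      by_cases hyx : y = x
      · subst hyx
        rw [hgx]
        by_cases hxr : y ∈ rest
        · rw [ih hxr (fun z hz => hagree z (by simp [hz]))]
          omega
        · have : rest.map g' = rest.map g := by
            apply List.map_congr_left
            intro z hz
            exact hagree z (by simp [hz]) (fun h => hxr (h ▸ hz))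
          rw [this]; omega
      · have hxr : x ∈ rest := by
          rcases List.mem_cons.mp hx with h | h
          · exact absurd h.symm hyx
          · exact h
        rw [hagree y (by simp) hyx, ih hxr (fun z hz => hagree z (by simp [hz]))]
        omega

-- gains are unchanged for values other than the appended one
theorem gain_append_of_ne (p : List Int) (x v : Int) (hne : x ≠ v) :
    gain (p ++ [x]) v = gain p v := by
  unfold gain
  rw [occsFrom_append]
  simp [hne]

theorem gain_nonneg (p : List Int) (v : Int) (hv : v ∈ p) : 0 ≤ gain p v := by
  have hne : occsFrom p 0 v ≠ [] := by
    rw [ne_eq, occsFrom_eq_nil_iff]; simp [hv]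
  rcases hocc : occsFrom p 0 v with _ | ⟨c, l'⟩
  · exact absurd hocc hne
  · unfold gain
    rw [hocc, PySem.List.max?_id_cons, PySem.List.min?_id_cons]
    have h1 := (PySem.List.le_foldl_max l' c).1
    have h2 := (PySem.List.foldl_min_le l' c).1
    simp only [Option.getD_some]
    omega

theorem gain_append_self (p : List Int) (x j : Int) (l' : List Int)
    (hocc : occsFrom p 0 x = j :: l') :
    gain (p ++ [x]) x = (p.length : Int) - j := by
  unfold gain
  rw [min?_occsFrom]
  rw [occsFrom_append, hocc, if_pos rfl]
  have hbound := occsFrom_bound p 0 x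
  rw [max?_append_singleton (j :: l') (0 + (p.length : Int))
      (fun y hy => le_of_lt (by have := hbound y (hocc ▸ hy); omega))]
  simp

theorem gain_append_new (p : List Int) (x : Int) (hocc : occsFrom p 0 x = []) :
    gain (p ++ [x]) x = 0 := by
  unfold gain
  rw [occsFrom_append, hocc, if_pos rfl, List.nil_append]
  rw [PySem.List.max?_id_cons, PySem.List.min?_id_cons]
  simp

theorem gain_le (p : List Int) (x j : Int) (l' : List Int)
    (hocc : occsFrom p 0 x = j :: l') :
    gain p x ≤ (p.length : Int) - j := by
  unfold gain
  rw [min?_occsFrom, hocc, PySem.List.max?_id_cons]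
  have hbound := occsFrom_bound p 0 x
  have hj : j < (p.length : Int) := by have := hbound j (by rw [hocc]; simp); omega
  have : l'.foldl max j ≤ (p.length : Int) := by
    refine foldl_max_of_le l' j _ (le_of_lt hj) ?_
    intro y hy
    have := hbound y (by rw [hocc]; simp [hy]); omega
  simp only [Option.getD_some, List.head?_cons]
  omega

-- invariant of A's grouping loop: each key's stored list is the index list of that value
theorem A_loop_getD (suffix : List Int) (n : Int) (d : PySem.Dict Int (List Int)) (v : Int) :
    (((PySem.List.enumerate suffix n).foldl (fun d p =>
        if d.contains p.2 then d.modify p.2 [] (fun l => l ++ [p.1])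
        else d.insert p.2 [p.1]) d)).getD v []
      = d.getD v [] ++ occsFrom suffix n v := by
  induction suffix generalizing n d with
  | nil => simp [PySem.List.enumerate_nil, occsFrom]
  | cons x rest ih =>
      rw [PySem.List.enumerate_cons, List.foldl_cons]
      simp only []
      by_cases hc : d.contains x
      · rw [if_pos hc, ih, occsFrom]
        rw [PySem.Dict.getD_modify]
        split_ifs with hvx hx hx
        · subst hvx; simp at hx; simp
        · subst hvx; exact absurd rfl hx
        · exact absurd hvx (by simp [hx])
        · simp
      · rw [if_neg hc, ih, occsFrom]
        rw [PySem.Dict.getD_insert]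
        split_ifs with hvx hx hx
        · subst hvx
          rw [PySem.Dict.getD_of_not_contains d _ (by simpa using hc)]
          simp
        · subst hvx; exact absurd rfl hx
        · exact absurd hvx (by simp [hx])
        · simp

theorem A_loop_keys (suffix : List Int) (n : Int) (d : PySem.Dict Int (List Int)) :
    (((PySem.List.enumerate suffix n).foldl (fun d p =>
        if d.contains p.2 then d.modify p.2 [] (fun l => l ++ [p.1])
        else d.insert p.2 [p.1]) d)).keys
      = PySem.Set.update d.keys suffix := by
  induction suffix generalizing n d with
  | nil => simp [PySem.List.enumerate_nil, PySem.Set.update_nil]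
  | cons x rest ih =>
      rw [PySem.List.enumerate_cons, List.foldl_cons, PySem.Set.update_cons]
      simp only []
      by_cases hc : d.contains x
      · rw [if_pos hc, ih, PySem.Dict.keys_modify,
            PySem.Dict.keys_insert_of_contains d _ hc,
            PySem.Set.add_of_mem (by rwa [← PySem.Dict.contains_iff_mem_keys])]
      · rw [if_neg hc, ih,
            PySem.Dict.keys_insert_of_not_contains d _ (by simpa using hc),
            PySem.Set.add_of_not_mem
              (by rw [← PySem.Dict.contains_iff_mem_keys]; simpa using hc)]

-- invariant of B's online loop
theorem B_loop (suffix : List Int) (p : List Int) (f : PySem.Dict Int Int) (b : Int)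
    (hf : ∀ v, f.get? v = (occsFrom p 0 v).head?)
    (hb : b = ((PySem.Set.ofList p).map (gain p)).foldl max 0) :
    (((PySem.List.enumerate suffix (p.length : Int)).foldl (fun st q =>
        if st.1.contains q.2 then (st.1, max st.2 (q.1 - st.1.getD q.2 0))
        else (st.1.insert q.2 q.1, st.2)) (f, b))).2
      = ((PySem.Set.ofList (p ++ suffix)).map (gain (p ++ suffix))).foldl max 0 := by
  induction suffix generalizing p f b with
  | nil => simpa [PySem.List.enumerate_nil] using hb
  | cons x rest ih =>
      rw [PySem.List.enumerate_cons, List.foldl_cons]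
      simp only []
      have hlen : (p.length : Int) + 1 = (((p ++ [x]).length : Nat) : Int) := by
        simp
      by_cases hc : f.contains x = true
      · -- x seen before: occsFrom p 0 x is nonempty
        rw [PySem.Dict.contains_eq_isSome_get?, hf x] at hc
        rcases hocc : occsFrom p 0 x with _ | ⟨j, l'⟩
        · rw [hocc] at hc; simp at hc
        · rw [if_pos (by rw [PySem.Dict.contains_eq_isSome_get?, hf x, hocc]; rfl)]
          have hget : f.getD x 0 = j := by
            rw [PySem.Dict.getD_eq_get?_getD, hf x, hocc]; rfl
          have hxp : x ∈ p := by
            by_contra hxp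
            rw [(occsFrom_eq_nil_iff p 0 x).2 hxp] at hocc; cases hocc
          have hS : PySem.Set.ofList (p ++ [x]) = PySem.Set.ofList p := by
            rw [PySem.Set.ofList_append_singleton,
                PySem.Set.add_of_mem (by rw [PySem.Set.mem_ofList]; exact hxp)]
          have hf' : ∀ v, f.get? v = (occsFrom (p ++ [x]) 0 v).head? := by
            intro v
            rw [occsFrom_append]
            by_cases hvx : x = v
            · subst hvx; rw [if_pos rfl, hf x, hocc]; simp
            · rw [if_neg hvx]; simp [hf v]
          have hb' : max b ((p.length : Int) - f.getD x 0)
              = ((PySem.Set.ofList (p ++ [x])).map (gain (p ++ [x]))).foldl max 0 := by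
            rw [hS, hget,
                M_map_update (PySem.Set.ofList p) x ((p.length : Int) - j)
                  (gain p) (gain (p ++ [x]))
                  (by rw [PySem.Set.mem_ofList]; exact hxp)
                  (fun y _ hy => gain_append_of_ne p x y (fun h => hy h.symm))
                  (gain_append_self p x j l' hocc)
                  (gain_le p x j l' hocc), ← hb]
          have := ih (p ++ [x]) f (max b ((p.length : Int) - f.getD x 0)) hf' hb'
          rw [← hlen] at this
          rw [this]
          simp
      · -- x is new
        rw [if_neg hc]
        have hget : f.get? x = none := by
          rw [PySem.Dict.contains_eq_isSome_get?] at hc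
          cases h : f.get? x
          · rfl
          · rw [h] at hc; simp at hc
        have hocc : occsFrom p 0 x = [] := by
          have := hf x; rw [hget] at this
          cases h : occsFrom p 0 x
          · rfl
          · rw [h] at this; simp at this
        have hxp : x ∉ p := (occsFrom_eq_nil_iff p 0 x).1 hocc
        have hf' : ∀ v, (f.insert x (p.length : Int)).get? v
            = (occsFrom (p ++ [x]) 0 v).head? := by
          intro v
          rw [occsFrom_append, PySem.Dict.get?_insert]
          by_cases hvx : v = x
          · subst hvx; rw [if_pos rfl, if_pos rfl, hocc]; simp
          · rw [if_neg hvx, if_neg (fun h => hvx h.symm)]; simp [hf v]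
        have hb' : b = ((PySem.Set.ofList (p ++ [x])).map (gain (p ++ [x]))).foldl max 0 := by
          rw [PySem.Set.ofList_append_singleton,
              PySem.Set.add_of_not_mem (by rw [PySem.Set.mem_ofList]; exact hxp),
              List.map_append]
          have hmap : (PySem.Set.ofList p).map (gain (p ++ [x]))
              = (PySem.Set.ofList p).map (gain p) := by
            apply List.map_congr_left
            intro v hv
            have hv' : v ∈ p := by simpa using hv
            exact gain_append_of_ne p x v (fun h => hxp (h ▸ hv'))
          rw [hmap]
          simp only [List.map_cons, List.map_nil, gain_append_new p x hocc]
          rw [M_append]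
          have := M_nonneg ((PySem.Set.ofList p).map (gain p))
          omega
        have := ih (p ++ [x]) (f.insert x (p.length : Int)) b hf' hb'
        rw [← hlen] at this
        rw [this]
        simp

theorem final_max (S : List Int) (g : Int → Int) (hS : S ≠ [])
    (hg : ∀ v ∈ S, 0 ≤ g v) :
    (PySem.List.max? (S.map g) (fun y => y)).getD 0 = (S.map g).foldl max 0 := by
  cases S with
  | nil => exact absurd rfl hS
  | cons v rest =>
      rw [List.map_cons, PySem.List.max?_id_cons, M_cons]
      have h0 : max 0 (g v) = g v := max_eq_right (hg v (by simp))
      rw [show (rest.map g).foldl max (g v) = (rest.map g).foldl max (max 0 (g v)) by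
            rw [h0],
          foldl_max_shift]
      simp only [Option.getD_some]
      omega

-- ===== VERDICT (by name: the statement is the Claim_ definition above) =====
theorem find_spec : Claim_equal_find := by
  intro t _ hpre
  unfold Spec_find find find_alt
  simp only []
  have hgetD : ∀ v, (((PySem.List.enumerate t 0).foldl (fun d p =>
      if d.contains p.2 then d.modify p.2 [] (fun l => l ++ [p.1])
      else d.insert p.2 [p.1]) PySem.Dict.empty)).getD v [] = occsFrom t 0 v := by
    intro v
    rw [A_loop_getD]
    simp [PySem.Dict.getD_empty]
  have hkeys : (((PySem.List.enumerate t 0).foldl (fun d p =>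
      if d.contains p.2 then d.modify p.2 [] (fun l => l ++ [p.1])
      else d.insert p.2 [p.1]) PySem.Dict.empty)).keys = PySem.Set.ofList t := by
    rw [A_loop_keys]
    simp [PySem.Dict.keys_empty, PySem.Set.update_nil_left]
  rw [PySem.List.foldl_append_singleton_eq_map, hkeys]
  have hmap : (PySem.Set.ofList t).map (fun x =>
      (PySem.List.max? ((((PySem.List.enumerate t 0).foldl (fun d p =>
        if d.contains p.2 then d.modify p.2 [] (fun l => l ++ [p.1])
        else d.insert p.2 [p.1]) PySem.Dict.empty)).getD x []) (fun y => y)).getD 0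
      - (PySem.List.min? ((((PySem.List.enumerate t 0).foldl (fun d p =>
        if d.contains p.2 then d.modify p.2 [] (fun l => l ++ [p.1])
        else d.insert p.2 [p.1]) PySem.Dict.empty)).getD x []) (fun y => y)).getD 0)
      = (PySem.Set.ofList t).map (gain t) := by
    apply List.map_congr_left
    intro v _
    rw [hgetD v]
    rfl
  rw [hmap]
  have hB := B_loop t [] PySem.Dict.empty 0
    (by intro v; simp [PySem.Dict.get?_empty, occsFrom])
    (by simp)
  simp only [List.length_nil, Int.natCast_zero, List.nil_append] at hB
  rw [hB]
  apply final_max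
  · cases t with
    | nil => exact absurd rfl hpre
    | cons y r =>
        intro h
        have : y ∈ PySem.Set.ofList (y :: r) := by
          rw [PySem.Set.mem_ofList]; simp
        rw [h] at this; cases this
  · intro v hv
    exact gain_nonneg t v (by simpa using hv)

def find_raises : Claim_raises_find := by
  unfold Claim_raises_find
  exact ⟨fun t _ h => by simp [Raises_find] at h; simp [Pre_find, h], by decide⟩
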